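-- pv_equiv track=rewrite | github.com/atiffany/dadBot | dadBot.py | findWordAfter
-- ===== SOURCE A (Python) =====
-- def findWordAfter(word, input):
--     sentence = input.split()
--     flag = False
--     for word in sentence:
--         if flag == True:
--             return word
--         if word == "i'm" or word == "im":
--             flag = True
-- ===== SOURCE B (Python) =====
-- def findWordAfter(word, input):
--     sentence = input.split()
--     hits = [sentence.index(m) for m in ("i'm", "im") if m in sentence]
--     if hits:
--         i = min(hits) + 1
--         if i < len(sentence):
--             return sentence[i]
-- ===== Notes on version B (the rewrite author's own statement) =====
-- stated objective: alternative
-- what changed: Instead of A's flag-carrying single scan, B first locates each marker with list.index (collecting the positions of "i'm" and "im" that occur), takes the minimum position, and returns the bounds-checked successor element by direct indexing.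
import Mathlib
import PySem

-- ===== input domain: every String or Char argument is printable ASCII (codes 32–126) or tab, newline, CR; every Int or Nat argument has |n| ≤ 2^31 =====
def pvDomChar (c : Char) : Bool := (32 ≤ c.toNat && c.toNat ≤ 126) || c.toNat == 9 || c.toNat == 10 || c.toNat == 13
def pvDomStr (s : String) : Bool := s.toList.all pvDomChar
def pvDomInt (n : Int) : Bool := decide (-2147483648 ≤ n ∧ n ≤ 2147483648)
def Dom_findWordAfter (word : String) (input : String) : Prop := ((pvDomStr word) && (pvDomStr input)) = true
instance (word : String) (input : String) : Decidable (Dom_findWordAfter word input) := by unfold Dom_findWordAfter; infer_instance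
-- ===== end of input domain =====

-- B replaces A's flag-carrying scan by locating the markers with list.index, taking the minimum
-- position and indexing its bounds-checked successor; return value only.
-- ===== PORT A =====
-- A's loop: carries the flag set by the previous token.
def findWordAfterLoop : List String → Bool → Option String
  | [], _ => none
  | w :: ws, flag =>
    if flag = true then some w
    else if w == "i'm" || w == "im" then findWordAfterLoop ws true
    else findWordAfterLoop ws flag

def findWordAfter (word : String) (input : String) : Option String :=
  findWordAfterLoop (PySem.Str.split₀ input) false

-- ===== PORT B =====
def findWordAfter_alt (word : String) (input : String) : Option String :=
  let sentence := PySem.Str.split₀ input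
  let hits := (["i'm", "im"].filter (fun m => sentence.contains m)).filterMap
      (fun m => PySem.List.index? sentence m)
  match PySem.List.min? hits (fun x => x) with
  | none => none
  | some j =>
    let i := j + 1
    if i < sentence.length then sentence[i]? else none

-- ===== PRECONDITION & SPEC =====
def Spec_findWordAfter (word : String) (input : String) (out : Option String) : Prop := out = findWordAfter_alt word input
instance (word : String) (input : String) (out : Option String) : Decidable (Spec_findWordAfter word input out) := by unfold Spec_findWordAfter; infer_instance

-- ===== CLAIM (what is proved, stated in full; the proofs are below) =====
def Claim_equal_findWordAfter : Prop := ∀ (word : String) (input : String), Dom_findWordAfter word input → Spec_findWordAfter word input (findWordAfter word input)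

-- ===== LEMMAS AND PROOFS =====

-- the body of findWordAfter_alt on an arbitrary token list
def altCore (ts : List String) : Option String :=
  let hits := (["i'm", "im"].filter (fun m => ts.contains m)).filterMap
      (fun m => PySem.List.index? ts m)
  match PySem.List.min? hits (fun x => x) with
  | none => none
  | some j =>
    let i := j + 1
    if i < ts.length then ts[i]? else none

theorem loop_true_eq_head (ts : List String) : findWordAfterLoop ts true = ts.head? := by
  cases ts <;> simp [findWordAfterLoop]

theorem altCore_cons_im' (ts : List String) : altCore ("i'm" :: ts) = ts.head? := by
  by_cases m2 : "im" ∈ ts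
  · obtain ⟨k, hk⟩ := Option.isSome_iff_exists.1 ((List.isSome_idxOf?).2 m2 : (List.idxOf? "im" ts).isSome)
    simp [altCore, m2, List.idxOf?_cons, hk, PySem.List.min?_id_cons]
    cases ts <;> simp_all
  · simp [altCore, m2, List.idxOf?_cons, PySem.List.min?_id_cons]
    cases ts <;> simp_all

theorem altCore_cons_im (ts : List String) : altCore ("im" :: ts) = ts.head? := by
  by_cases m1 : "i'm" ∈ ts
  · obtain ⟨k, hk⟩ := Option.isSome_iff_exists.1 ((List.isSome_idxOf?).2 m1 : (List.idxOf? "i'm" ts).isSome)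
    simp [altCore, m1, List.idxOf?_cons, hk, PySem.List.min?_id_cons]
    cases ts <;> simp_all
  · simp [altCore, m1, List.idxOf?_cons, PySem.List.min?_id_cons]
    cases ts <;> simp_all

theorem altCore_cons_other (w : String) (ts : List String) (h1 : ¬ w = "i'm") (h2 : ¬ w = "im") :
    altCore (w :: ts) = altCore ts := by
  by_cases m1 : "i'm" ∈ ts <;> by_cases m2 : "im" ∈ ts
  · obtain ⟨j, hj⟩ := Option.isSome_iff_exists.1 ((List.isSome_idxOf?).2 m1 : (List.idxOf? "i'm" ts).isSome)
    obtain ⟨k, hk⟩ := Option.isSome_iff_exists.1 ((List.isSome_idxOf?).2 m2 : (List.idxOf? "im" ts).isSome)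
    simp [altCore, m1, m2, List.idxOf?_cons, hj, hk, Ne.symm h1, Ne.symm h2, h1, h2,
      PySem.List.min?_id_cons, Nat.succ_min_succ]
  · obtain ⟨j, hj⟩ := Option.isSome_iff_exists.1 ((List.isSome_idxOf?).2 m1 : (List.idxOf? "i'm" ts).isSome)
    simp [altCore, m1, m2, List.idxOf?_cons, hj, Ne.symm h1, Ne.symm h2, h1,
      PySem.List.min?_id_cons]
  · obtain ⟨k, hk⟩ := Option.isSome_iff_exists.1 ((List.isSome_idxOf?).2 m2 : (List.idxOf? "im" ts).isSome)
    simp [altCore, m1, m2, List.idxOf?_cons, hk, Ne.symm h1, Ne.symm h2, h2,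
      PySem.List.min?_id_cons]
  · simp [altCore, m1, m2, List.idxOf?_cons, Ne.symm h1, Ne.symm h2, PySem.List.min?]

theorem loop_eq_altCore (ts : List String) : findWordAfterLoop ts false = altCore ts := by
  induction ts with
  | nil => rfl
  | cons w ts ih =>
    by_cases h1 : w = "i'm"
    · subst h1; simpa [findWordAfterLoop, loop_true_eq_head] using (altCore_cons_im' ts).symm
    · by_cases h2 : w = "im"
      · subst h2; simpa [findWordAfterLoop, h1, loop_true_eq_head] using (altCore_cons_im ts).symm
      · rw [altCore_cons_other w ts h1 h2, ← ih]
        simp [findWordAfterLoop, h1, h2]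

-- ===== VERDICT (by name: the statement is the Claim_ definition above) =====
theorem findWordAfter_spec : Claim_equal_findWordAfter := by
  intro word input _
  unfold Spec_findWordAfter findWordAfter findWordAfter_alt
  exact loop_eq_altCore _
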